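-- pv_equiv track=rewrite | github.com/lmiksch/cocopaths | analysis/slurm/check_drt_output.py | drt_match
-- ===== SOURCE A (Python) =====
-- def drt_match(drt_out_struct,fp_struct):
--     if len(drt_out_struct) != len(fp_struct)    :
--         return False
--     for drt_char,fp_char in zip(drt_out_struct,fp_struct):
--         if fp_char == ".":
--             continue
--         elif drt_char != fp_char:
--             return False
--     return True
-- ===== SOURCE B (Python) =====
-- import re
--
--
-- def drt_match(drt_out_struct, fp_struct):
--     pattern = "".join(c if c == "." else re.escape(c) for c in fp_struct)
--     return re.fullmatch(pattern, drt_out_struct, re.DOTALL) is not None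
-- ===== Notes on version B (the rewrite author's own statement) =====
-- stated objective: idiomatic
-- what changed: Replaced the length check plus position-by-position comparison loop with compiling fp_struct into a regex (dots kept as wildcards, everything else re.escape'd) and a single re.fullmatch with DOTALL.
import Mathlib
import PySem

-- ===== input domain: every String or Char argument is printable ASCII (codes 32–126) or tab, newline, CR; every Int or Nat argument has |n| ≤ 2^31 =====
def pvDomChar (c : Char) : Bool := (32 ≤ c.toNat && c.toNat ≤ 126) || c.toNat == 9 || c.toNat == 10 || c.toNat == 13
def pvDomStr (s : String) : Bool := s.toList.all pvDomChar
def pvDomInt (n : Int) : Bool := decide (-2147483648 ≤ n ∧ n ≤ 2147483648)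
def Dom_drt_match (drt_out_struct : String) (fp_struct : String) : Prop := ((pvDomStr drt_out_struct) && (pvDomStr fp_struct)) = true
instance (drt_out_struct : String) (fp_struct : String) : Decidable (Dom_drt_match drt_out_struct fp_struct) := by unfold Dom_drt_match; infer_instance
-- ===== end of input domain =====

-- B replaces A's manual position-by-position loop with building a regex from fp_struct and one re.fullmatch (more idiomatic, same cost).


-- ===== PORT A =====
-- the for-loop over zip(drt_out_struct, fp_struct) with its early return
def drtLoopA : List (Char × Char) → Bool
  | [] => true
  | (drt_char, fp_char) :: rest =>
    if fp_char = '.' then drtLoopA rest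
    else if drt_char ≠ fp_char then false
    else drtLoopA rest

def drt_match (drt_out_struct : String) (fp_struct : String) : Bool :=
  if drt_out_struct.toList.length ≠ fp_struct.toList.length then false
  else drtLoopA (drt_out_struct.toList.zip fp_struct.toList)

-- ===== PORT B =====
-- Python re.escape (3.7+): prefix a backslash to exactly the regex special characters
def reSpecial : List Char := ['(', ')', '[', ']', '{', '}', '?', '*', '+', '-', '|', '^', '$', '\\', '.', '&', '~', '#', ' ', '\t', '\n', '\r', '\x0b', '\x0c']

def reEscape (c : Char) : List Char :=
  if c ∈ reSpecial then ['\\', c] else [c]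

-- the pattern string: '.' kept verbatim (wildcard), every other char re.escape'd
def drtPattern (fp_struct : String) : List Char :=
  fp_struct.toList.flatMap (fun c => if c = '.' then [c] else reEscape c)

-- the regex engine on the patterns drtPattern produces: sequences of wildcards and
-- (possibly backslash-escaped) literal characters, matched with fullmatch anchoring
inductive RTok where
  | any : RTok
  | lit : Char → RTok
deriving DecidableEq, Repr

def rparse : List Char → List RTok
  | [] => []
  | '\\' :: c :: rest => RTok.lit c :: rparse rest
  | '.' :: rest => RTok.any :: rparse rest
  | c :: rest => RTok.lit c :: rparse rest

def rfullmatch : List RTok → List Char → Bool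
  | [], [] => true
  | RTok.any :: ts, _ :: cs => rfullmatch ts cs
  | RTok.lit c :: ts, d :: cs => d = c && rfullmatch ts cs
  | _, _ => false

def drt_match_alt (drt_out_struct : String) (fp_struct : String) : Bool :=
  rfullmatch (rparse (drtPattern fp_struct)) drt_out_struct.toList

-- ===== PRECONDITION & SPEC =====
def Spec_drt_match (drt_out_struct : String) (fp_struct : String) (out : Bool) : Prop := out = drt_match_alt drt_out_struct fp_struct
instance (drt_out_struct : String) (fp_struct : String) (out : Bool) : Decidable (Spec_drt_match drt_out_struct fp_struct out) := by unfold Spec_drt_match; infer_instance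

-- ===== CLAIM (what is proved, stated in full; the proofs are below) =====
def Claim_equal_drt_match : Prop := ∀ (drt_out_struct : String) (fp_struct : String), Dom_drt_match drt_out_struct fp_struct → Spec_drt_match drt_out_struct fp_struct (drt_match drt_out_struct fp_struct)

-- ===== LEMMAS AND PROOFS =====

def drtTok (c : Char) : RTok := if c = '.' then RTok.any else RTok.lit c

theorem rparse_cons_plain (c : Char) (rest : List Char) (hbs : c ≠ '\\') (hdot : c ≠ '.') :
    rparse (c :: rest) = RTok.lit c :: rparse rest := by
  rw [rparse.eq_def]
  split
  · simp_all
  · rename_i h; injection h with h1 _; exact absurd h1 hbs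
  · rename_i h; injection h with h1 _; exact absurd h1 hdot
  · rename_i h; injection h with h1 h2; rw [← h1, ← h2]

theorem rparse_piece (c : Char) (rest : List Char) :
    rparse ((if c = '.' then [c] else reEscape c) ++ rest) = drtTok c :: rparse rest := by
  by_cases hdot : c = '.'
  · subst hdot; simp [rparse, drtTok]
  · simp only [if_neg hdot, reEscape]
    by_cases hsp : c ∈ reSpecial
    · simp [if_pos hsp, rparse, drtTok, hdot]
    · have hbs : c ≠ '\\' := by intro h; subst h; exact hsp (by decide)
      simp only [if_neg hsp, List.singleton_append, rparse_cons_plain c rest hbs hdot,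
        drtTok, if_neg hdot]

theorem rparse_pattern (f : List Char) :
    rparse (f.flatMap (fun c => if c = '.' then [c] else reEscape c)) = f.map drtTok := by
  induction f with
  | nil => simp [rparse]
  | cons c rest ih => simp only [List.flatMap_cons, rparse_piece, List.map_cons, ih]

theorem rfullmatch_length {ts : List RTok} {cs : List Char}
    (h : rfullmatch ts cs = true) : ts.length = cs.length := by
  induction ts generalizing cs with
  | nil => cases cs with
    | nil => rfl
    | cons c cs => simp [rfullmatch] at h
  | cons t ts ih =>
    cases cs with
    | nil => cases t <;> simp [rfullmatch] at h
    | cons c cs =>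
      cases t with
      | any => simp [rfullmatch] at h; simpa using ih h
      | lit l => simp [rfullmatch] at h; simpa using ih h.2

theorem loop_eq (f d : List Char) (hlen : d.length = f.length) :
    drtLoopA (d.zip f) = rfullmatch (f.map drtTok) d := by
  induction f generalizing d with
  | nil =>
    cases d with
    | nil => simp [drtLoopA, rfullmatch]
    | cons e ds => simp at hlen
  | cons c fs ih =>
    cases d with
    | nil => simp at hlen
    | cons e ds =>
      simp only [List.length_cons] at hlen
      by_cases hdot : c = '.'
      · subst hdot
        simp [drtLoopA, drtTok, rfullmatch, ih ds (by omega)]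
      · simp only [List.zip_cons_cons, drtLoopA, if_neg hdot, List.map_cons, drtTok,
          rfullmatch]
        by_cases heq : e = c
        · simp [heq, ih ds (by omega)]
        · simp [fun h => heq h]

theorem main_lemma (f d : List Char) :
    (if d.length ≠ f.length then false else drtLoopA (d.zip f)) = rfullmatch (f.map drtTok) d := by
  by_cases hlen : d.length = f.length
  · rw [if_neg (by omega)]; exact loop_eq f d hlen
  · rw [if_pos (by omega)]
    cases hr : rfullmatch (List.map drtTok f) d with
    | false => rfl
    | true =>
      have := rfullmatch_length hr
      simp at this
      omega

-- ===== VERDICT (by name: the statement is the Claim_ definition above) =====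
theorem drt_match_spec : Claim_equal_drt_match := by
  intro d f _
  unfold Spec_drt_match drt_match drt_match_alt drtPattern
  rw [rparse_pattern]
  exact main_lemma f.toList d.toList
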